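-- pv_equiv track=rewrite | github.com/Astrocyte74/-YTV2-NAS- | research_api/research_service/synthesizer.py | _message_needs_history
-- ===== SOURCE A (Python) =====
-- def _message_needs_history(user_message: str) -> bool:
--     text = (user_message or "").strip().lower()
--     if not text:
--         return False
--
--     referential_markers = (
--         " it ",
--         " its ",
--         " they ",
--         " them ",
--         " their ",
--         " that ",
--         " those ",
--         " these ",
--         " this ",
--         " same ",
--         " previous ",
--         " above ",
--         " earlier ",
--     )
--     padded = f" {text} "
--     if any(marker in padded for marker in referential_markers):
--         return True
--
--     return text.startswith((
--         "what about",
--         "how about",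
--         "and ",
--         "also ",
--         "compare that",
--         "compare those",
--         "compare them",
--         "research that",
--         "research those",
--         "research them",
--     ))
-- ===== SOURCE B (Python) =====
-- _REFERENTIAL_WORDS = frozenset((
--     "it", "its", "they", "them", "their", "that", "those",
--     "these", "this", "same", "previous", "above", "earlier",
-- ))
--
-- _PREFIXES = (
--     "what about",
--     "how about",
--     "and ",
--     "also ",
--     "compare that",
--     "compare those",
--     "compare them",
--     "research that",
--     "research those",
--     "research them",
-- )
--
--
-- def _message_needs_history(user_message: str) -> bool:
--     text = (user_message or "").strip().lower()
--     if not text: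
--         return False
--
--     words = set(text.split(" "))
--     if not _REFERENTIAL_WORDS.isdisjoint(words):
--         return True
--
--     return text.startswith(_PREFIXES)
-- ===== Notes on version B (the rewrite author's own statement) =====
-- stated objective: idiomatic
-- what changed: Instead of building the padded string and running a substring scan for each of the 13 markers, B splits the normalized text once on single spaces into a word set and tests it against a frozenset of referential words; the prefix fallback is unchanged.
import Mathlib
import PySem

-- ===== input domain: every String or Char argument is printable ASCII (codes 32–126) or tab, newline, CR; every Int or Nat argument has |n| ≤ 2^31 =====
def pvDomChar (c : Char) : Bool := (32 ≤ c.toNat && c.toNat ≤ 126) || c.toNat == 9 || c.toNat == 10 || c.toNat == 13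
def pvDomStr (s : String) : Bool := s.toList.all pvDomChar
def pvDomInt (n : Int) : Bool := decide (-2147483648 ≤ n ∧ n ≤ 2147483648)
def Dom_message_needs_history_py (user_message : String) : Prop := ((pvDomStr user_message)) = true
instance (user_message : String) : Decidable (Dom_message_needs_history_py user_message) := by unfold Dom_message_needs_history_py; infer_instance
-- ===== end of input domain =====

-- B replaces the per-marker substring scan of the padded text by one split-on-space into a
-- word set intersected with the referential words (idiomatic; same observable behaviour).

-- ===== PORT A =====
def message_needs_history_py (user_message : String) : Bool :=
  -- text = (user_message or "").strip().lower()   ('' or "" is '' — the 'or ""' is the identity on str)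
  let text : List Char := PySem.Chars.lower (PySem.Chars.strip user_message.toList)
  if text.isEmpty then false
  else
    let referential_markers : List (List Char) :=
      [" it ".toList, " its ".toList, " they ".toList, " them ".toList, " their ".toList,
       " that ".toList, " those ".toList, " these ".toList, " this ".toList, " same ".toList,
       " previous ".toList, " above ".toList, " earlier ".toList]
    -- padded = f" {text} "  (string concatenation, done on the char-list side)
    let padded : List Char := ' ' :: text ++ [' ']
    if referential_markers.any (fun m => PySem.Chars.isIn m padded) then true
    else
      ["what about".toList, "how about".toList, "and ".toList, "also ".toList,
       "compare that".toList, "compare those".toList, "compare them".toList,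
       "research that".toList, "research those".toList, "research them".toList].any
        (fun p => PySem.Chars.startswith text p)

-- ===== PORT B =====
-- _REFERENTIAL_WORDS (a frozenset literal; represented as its distinct elements)
def pvRefWords : List (List Char) :=
  ["it".toList, "its".toList, "they".toList, "them".toList, "their".toList, "that".toList,
   "those".toList, "these".toList, "this".toList, "same".toList, "previous".toList,
   "above".toList, "earlier".toList]

-- _PREFIXES
def pvPrefixes : List (List Char) :=
  ["what about".toList, "how about".toList, "and ".toList, "also ".toList,
   "compare that".toList, "compare those".toList, "compare them".toList,
   "research that".toList, "research those".toList, "research them".toList]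

def message_needs_history_py_alt (user_message : String) : Bool :=
  let text : List Char := PySem.Chars.lower (PySem.Chars.strip user_message.toList)
  if text.isEmpty then false
  else
    -- words = set(text.split(" "))
    let words : PySem.Set (List Char) := PySem.Set.ofList (PySem.Chars.splitOn text [' '])
    -- not _REFERENTIAL_WORDS.isdisjoint(words)
    if pvRefWords.any (fun w => words.contains w) then true
    else pvPrefixes.any (fun p => PySem.Chars.startswith text p)

-- ===== PRECONDITION & SPEC =====
def Spec_message_needs_history_py (user_message : String) (out : Bool) : Prop := out = message_needs_history_py_alt user_message
instance (user_message : String) (out : Bool) : Decidable (Spec_message_needs_history_py user_message out) := by unfold Spec_message_needs_history_py; infer_instance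

-- ===== CLAIM (what is proved, stated in full; the proofs are below) =====
def Claim_equal_message_needs_history_py : Prop := ∀ (user_message : String), Dom_message_needs_history_py user_message → Spec_message_needs_history_py user_message (message_needs_history_py user_message)

-- ===== LEMMAS AND PROOFS =====

-- reference tokenizer: Python's text.split(" ") as plain structural recursion
def pvSp : List Char → List (List Char)
  | [] => [[]]
  | c :: t => if c = ' ' then [] :: pvSp t else
      match pvSp t with
      | [] => [[c]]
      | p :: ps => (c :: p) :: ps

-- prepend u to the head token
def pvConsHead (u : List Char) : List (List Char) → List (List Char)
  | [] => [u]
  | p :: ps => (u ++ p) :: ps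

lemma pvSp_ne_nil (t : List Char) : pvSp t ≠ [] := by
  cases t with
  | nil => simp [pvSp]
  | cons c t =>
    simp only [pvSp]
    split <;> [simp; split <;> simp]

lemma pvConsHead_nil {xs : List (List Char)} (h : xs ≠ []) : pvConsHead [] xs = xs := by
  cases xs with
  | nil => exact absurd rfl h
  | cons p ps => simp [pvConsHead]

lemma pvConsHead_consHead (a b : List Char) {xs : List (List Char)} (h : xs ≠ []) :
    pvConsHead a (pvConsHead b xs) = pvConsHead (a ++ b) xs := by
  cases xs with
  | nil => exact absurd rfl h
  | cons p ps => simp [pvConsHead]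

lemma pvSp_cons_space (t : List Char) : pvSp (' ' :: t) = [] :: pvSp t := by
  simp [pvSp]

lemma pvSp_cons_ne {c : Char} (hc : c ≠ ' ') (t : List Char) :
    pvSp (c :: t) = pvConsHead [c] (pvSp t) := by
  simp only [pvSp, if_neg hc]
  cases h : pvSp t with
  | nil => exact absurd h (pvSp_ne_nil t)
  | cons p ps => simp [pvConsHead]

-- the fuel-based splitter of PySem agrees with pvSp
lemma pvGo_sp : ∀ (fuel : Nat) (l : List Char), l.length ≤ fuel → ∀ (cur : List Char) (acc : List (List Char)),
    PySem.Chars.splitOn.go [' '] fuel l cur acc = acc.reverse ++ pvConsHead cur.reverse (pvSp l) := by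
  intro fuel
  induction fuel with
  | zero =>
    intro l hl cur acc
    have : l = [] := List.eq_nil_of_length_eq_zero (Nat.le_zero.mp hl)
    subst this
    simp [PySem.Chars.splitOn.go, pvSp, pvConsHead]
  | succ fuel ih =>
    intro l hl cur acc
    cases l with
    | nil => simp [PySem.Chars.splitOn.go, pvSp, pvConsHead]
    | cons c rest =>
      by_cases hc : c = ' '
      · subst hc
        have hpre : [' '].isPrefixOf (' ' :: rest) = true := by simp [List.isPrefixOf]
        rw [show PySem.Chars.splitOn.go [' '] (fuel + 1) (' ' :: rest) cur acc
              = PySem.Chars.splitOn.go [' '] fuel (List.drop 1 (' ' :: rest)) [] (cur.reverse :: acc) by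
            simp [PySem.Chars.splitOn.go, hpre]]
        simp only [List.drop_succ_cons, List.drop_zero]
        rw [ih rest (by simpa using Nat.lt_succ_iff.mp (by simpa using hl)) [] (cur.reverse :: acc)]
        rw [pvSp_cons_space]
        simp only [List.reverse_nil, pvConsHead_nil (pvSp_ne_nil rest)]
        simp [pvConsHead]
      · have hpre : [' '].isPrefixOf (c :: rest) = false := by
          simp [List.isPrefixOf]
          exact fun h => absurd h.symm hc
        rw [show PySem.Chars.splitOn.go [' '] (fuel + 1) (c :: rest) cur acc
              = PySem.Chars.splitOn.go [' '] fuel rest (c :: cur) acc by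
            simp [PySem.Chars.splitOn.go, hpre]]
        rw [ih rest (by simpa using Nat.lt_succ_iff.mp (by simpa using hl)) (c :: cur) acc]
        rw [pvSp_cons_ne hc, pvConsHead_consHead _ _ (pvSp_ne_nil rest)]
        simp only [List.reverse_cons]

lemma pvSplitOn_eq_sp (t : List Char) : PySem.Chars.splitOn t [' '] = pvSp t := by
  unfold PySem.Chars.splitOn
  rw [pvGo_sp (t.length + 1) t (Nat.le_succ _) [] []]
  simp [pvConsHead_nil (pvSp_ne_nil t)]

-- the first space splits an append uniquely when the left reference part is space-free
lemma pvSplitSpace : ∀ (a u m r : List Char), ' ' ∉ u → a ++ ' ' :: m = u ++ ' ' :: r →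
    (a = u ∧ m = r) ∨ ∃ q, a = u ++ ' ' :: q ∧ q ++ ' ' :: m = r := by
  intro a
  induction a with
  | nil =>
    intro u m r hu h
    cases u with
    | nil => left; simpa using h
    | cons y u' =>
      simp only [List.nil_append, List.cons_append, List.cons.injEq] at h
      exact absurd (by simp [← h.1]) hu
  | cons x a' ih =>
    intro u m r hu h
    cases u with
    | nil =>
      simp only [List.cons_append, List.nil_append, List.cons.injEq] at h
      right
      exact ⟨a', by simp [h.1], h.2⟩
    | cons y u' =>
      simp only [List.cons_append, List.cons.injEq] at h
      have hu' : ' ' ∉ u' := fun hm => hu (List.mem_cons_of_mem _ hm)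
      rcases ih u' m r hu' h.2 with ⟨ha, hm⟩ | ⟨q, ha, hq⟩
      · left; simp [h.1, ha, hm]
      · right; exact ⟨q, by simp [h.1, ha], hq⟩

-- a padded word occurs in a padded space-free string iff the words are equal
lemma pvInfixPad_nil (w u : List Char) (hw : ' ' ∉ w) (hu : ' ' ∉ u) :
    (' ' :: w ++ [' ']) <:+: (' ' :: u ++ [' ']) ↔ w = u := by
  constructor
  · rintro ⟨s₁, s₂, h⟩
    cases s₁ with
    | nil =>
      simp only [List.nil_append, List.cons_append, List.append_assoc, List.cons.injEq] at h
      have h' : w ++ ' ' :: s₂ = u ++ ' ' :: [] := by simpa using h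
      rcases pvSplitSpace w u s₂ [] hu h' with ⟨he, _⟩ | ⟨q, he, _⟩
      · exact he
      · exact absurd (by simp [he]) hw
    | cons d s₁' =>
      simp only [List.cons_append, List.append_assoc, List.cons.injEq] at h
      have h' : s₁' ++ ' ' :: (w ++ ' ' :: s₂) = u ++ ' ' :: [] := by
        simpa [List.append_assoc] using h.2
      rcases pvSplitSpace s₁' u (w ++ ' ' :: s₂) [] hu h' with ⟨_, hm⟩ | ⟨q, _, hq⟩
      · exact absurd hm (by simp)
      · exact absurd hq (by simp)
  · rintro rfl
    exact ⟨[], [], by simp⟩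

-- shifting the padded-occurrence test over a leading space-free word
lemma pvInfixPad_shift (w u r : List Char) (hw : ' ' ∉ w) (hu : ' ' ∉ u) :
    (' ' :: w ++ [' ']) <:+: (' ' :: u ++ ' ' :: r) ↔
      w = u ∨ (' ' :: w ++ [' ']) <:+: (' ' :: r) := by
  constructor
  · rintro ⟨s₁, s₂, h⟩
    cases s₁ with
    | nil =>
      simp only [List.nil_append, List.cons_append, List.append_assoc, List.cons.injEq] at h
      have h' : w ++ ' ' :: s₂ = u ++ ' ' :: r := by simpa using h
      rcases pvSplitSpace w u s₂ r hu h' with ⟨he, _⟩ | ⟨q, he, _⟩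
      · exact Or.inl he
      · exact absurd (by simp [he]) hw
    | cons d s₁' =>
      simp only [List.cons_append, List.append_assoc, List.cons.injEq] at h
      have h' : s₁' ++ ' ' :: (w ++ ' ' :: s₂) = u ++ ' ' :: r := by
        simpa [List.append_assoc] using h.2
      rcases pvSplitSpace s₁' u (w ++ ' ' :: s₂) r hu h' with ⟨_, hm⟩ | ⟨q, _, hq⟩
      · exact Or.inr ⟨[], s₂, by simp [← hm]⟩
      · refine Or.inr ⟨' ' :: q, s₂, ?_⟩
        have h3 := congrArg (fun x => ' ' :: x) hq
        simpa [List.append_assoc] using h3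
  · rintro (rfl | ⟨s₁, s₂, h⟩)
    · exact ⟨[], r, by simp⟩
    · exact ⟨' ' :: u ++ s₁, s₂, by simp [← h, List.append_assoc]⟩

-- main invariant: membership among the tokens (head token extended by u) = padded infix test
lemma pvMain (w : List Char) (hw : ' ' ∉ w) : ∀ (t u : List Char), ' ' ∉ u →
    (w ∈ pvConsHead u (pvSp t) ↔ (' ' :: w ++ [' ']) <:+: (' ' :: (u ++ t) ++ [' '])) := by
  intro t
  induction t with
  | nil =>
    intro u hu
    simp only [pvSp, pvConsHead, List.append_nil, List.mem_singleton]
    exact (pvInfixPad_nil w u hw hu).symm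
  | cons c t' ih =>
    intro u hu
    by_cases hc : c = ' '
    · subst hc
      rw [pvSp_cons_space]
      have hmem : w ∈ pvConsHead u ([] :: pvSp t') ↔ w = u ∨ w ∈ pvSp t' := by
        simp [pvConsHead]
      have htail : w ∈ pvSp t' ↔ (' ' :: w ++ [' ']) <:+: (' ' :: t' ++ [' ']) := by
        have := ih [] (by simp)
        rwa [pvConsHead_nil (pvSp_ne_nil t'), List.nil_append] at this
      rw [hmem, htail]
      have hs : (' ' :: (u ++ ' ' :: t') ++ [' ']) = (' ' :: u ++ ' ' :: (t' ++ [' '])) := by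
        simp
      rw [hs, pvInfixPad_shift w u (t' ++ [' ']) hw hu]
      constructor
      · rintro (rfl | h)
        · exact Or.inl rfl
        · exact Or.inr (by simpa using h)
      · rintro (rfl | h)
        · exact Or.inl rfl
        · exact Or.inr (by simpa using h)
    · rw [pvSp_cons_ne hc, pvConsHead_consHead _ _ (pvSp_ne_nil t')]
      have hu' : ' ' ∉ u ++ [c] := by
        simp [hu]
        exact fun h => hc h.symm
      have := ih (u ++ [c]) hu'
      rwa [show (u ++ [c]) ++ t' = u ++ c :: t' by simp] at this

lemma pvContainsOfList {α : Type} [BEq α] [LawfulBEq α] (xs : List α) (y : α) :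
    (PySem.Set.ofList xs).contains y = xs.contains y := by
  by_cases h : y ∈ xs
  · simp [h, (PySem.Set.mem_ofList xs y).mpr h]
  · have h' : y ∉ PySem.Set.ofList xs := fun hm => h ((PySem.Set.mem_ofList xs y).mp hm)
    simp [h, h']

-- key bridge: one padded-marker substring test of A = one set-membership test of B
lemma pvKey (m w t : List Char) (hm : m = ' ' :: w ++ [' ']) (hw : ' ' ∉ w) :
    PySem.Chars.isIn m (' ' :: t ++ [' ']) =
      (PySem.Set.ofList (PySem.Chars.splitOn t [' '])).contains w := by
  subst hm
  rw [pvContainsOfList, pvSplitOn_eq_sp]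
  have hiff := pvMain w hw t [] (by simp)
  rw [pvConsHead_nil (pvSp_ne_nil t), List.nil_append] at hiff
  by_cases h : w ∈ pvSp t
  · rw [List.contains_iff_mem.mpr h, (PySem.Chars.isIn_iff_infix _ _).mpr (hiff.mp h)]
  · have h1 : PySem.Chars.isIn (' ' :: w ++ [' ']) (' ' :: t ++ [' ']) = false := by
      rw [PySem.Chars.isIn_eq_false_iff]
      exact fun hin => h (hiff.mpr hin)
    have h2 : (pvSp t).contains w = false := by
      simp [h]
    rw [h1, h2]

lemma pvAnyEq (t : List Char) :
    ([" it ".toList, " its ".toList, " they ".toList, " them ".toList, " their ".toList,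
      " that ".toList, " those ".toList, " these ".toList, " this ".toList, " same ".toList,
      " previous ".toList, " above ".toList, " earlier ".toList].any
        (fun m => PySem.Chars.isIn m (' ' :: t ++ [' ']))) =
    (pvRefWords.any (fun w => (PySem.Set.ofList (PySem.Chars.splitOn t [' '])).contains w)) := by
  simp only [pvRefWords, List.any_cons, List.any_nil]
  rw [pvKey " it ".toList "it".toList t (by decide) (by decide),
      pvKey " its ".toList "its".toList t (by decide) (by decide),
      pvKey " they ".toList "they".toList t (by decide) (by decide),
      pvKey " them ".toList "them".toList t (by decide) (by decide),
      pvKey " their ".toList "their".toList t (by decide) (by decide),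
      pvKey " that ".toList "that".toList t (by decide) (by decide),
      pvKey " those ".toList "those".toList t (by decide) (by decide),
      pvKey " these ".toList "these".toList t (by decide) (by decide),
      pvKey " this ".toList "this".toList t (by decide) (by decide),
      pvKey " same ".toList "same".toList t (by decide) (by decide),
      pvKey " previous ".toList "previous".toList t (by decide) (by decide),
      pvKey " above ".toList "above".toList t (by decide) (by decide),
      pvKey " earlier ".toList "earlier".toList t (by decide) (by decide)]

-- ===== VERDICT (by name: the statement is the Claim_ definition above) =====
theorem message_needs_history_py_spec : Claim_equal_message_needs_history_py := by
  intro user_message _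
  unfold Spec_message_needs_history_py message_needs_history_py message_needs_history_py_alt
  simp only [pvPrefixes]
  by_cases h : (PySem.Chars.lower (PySem.Chars.strip user_message.toList)).isEmpty
  · simp [h]
  · simp only [h, Bool.false_eq_true, if_false]
    rw [pvAnyEq]
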